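-- pv_equiv track=rewrite | github.com/Camel2Go/stuff | cybersec/stuff.py | rsa_wienersattack
-- ===== SOURCE A (Python) =====
-- def extendedeuclidalgo(x: int, y: int) -> list:
--     r = x % y
--     out = [(x // y, r)]
--     if not r: return out
--     out.extend(extendedeuclidalgo(y, r))
--     return out
--
-- def continuedfracttions(x: int, y: int) -> list:
--     return [x[0] for x in extendedeuclidalgo(x, y)]
--
-- def convergents(fractions: list) -> list:
--     convergents = [(fractions[0], 1), (fractions[1] * fractions[0] + 1, fractions[1])]
--     for i in range(2, len(fractions)):
--         convergents.append((fractions[i] * convergents[i - 1][0] + convergents[i - 2][0], fractions[i] * convergents[i - 1][1] + convergents[i - 2][1]))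
--     return convergents
--
-- def rsa_wienersattack(e: int, n: int):
--     from math import isqrt
--     fractions = continuedfracttions(e, n)
--     converg = convergents(fractions)[1:]
--     for k, d in converg:
--         if not k: continue
--         phi = (e * d - 1) // k
--         x = n - int(phi) + 1
--         x2 = x * x // 4
--         if n > x2: continue
--         squareroot = isqrt(x2 - n)
--         p = (x // 2 + squareroot)
--         q = (x // 2 - squareroot)
--         if p * q == n:
--             return p, q
-- ===== SOURCE B (Python) =====
-- def rsa_wienersattack(e: int, n: int):
--     # Single-pass: generate continued-fraction quotients of e/n with the Euclidean
--     # algorithm and maintain running convergents; test each convergent after the first.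
--     from math import isqrt
--     q, r = divmod(e, n)
--     num_prev, den_prev = 1, 0
--     num, den = q, 1
--     a, b = n, r
--     while b:
--         q, r = divmod(a, b)
--         num_prev, num = num, q * num + num_prev
--         den_prev, den = den, q * den + den_prev
--         a, b = b, r
--         k, d = num, den
--         if not k:
--             continue
--         phi = (e * d - 1) // k
--         x = n - phi + 1
--         x2 = x * x // 4
--         if n > x2:
--             continue
--         squareroot = isqrt(x2 - n)
--         p = x // 2 + squareroot
--         q2 = x // 2 - squareroot
--         if p * q2 == n:
--             return p, q2
--     return None
-- ===== Notes on version B (the rewrite author's own statement) =====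
-- stated objective: simpler
-- what changed: Replaced A's four-function pipeline (recursive Euclid list, quotient extraction, index-based convergents table, then a scan) by one iterative loop that produces each continued-fraction quotient and its running convergent pair on the fly and tests it immediately, returning early without materialising any list.
import Mathlib
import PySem

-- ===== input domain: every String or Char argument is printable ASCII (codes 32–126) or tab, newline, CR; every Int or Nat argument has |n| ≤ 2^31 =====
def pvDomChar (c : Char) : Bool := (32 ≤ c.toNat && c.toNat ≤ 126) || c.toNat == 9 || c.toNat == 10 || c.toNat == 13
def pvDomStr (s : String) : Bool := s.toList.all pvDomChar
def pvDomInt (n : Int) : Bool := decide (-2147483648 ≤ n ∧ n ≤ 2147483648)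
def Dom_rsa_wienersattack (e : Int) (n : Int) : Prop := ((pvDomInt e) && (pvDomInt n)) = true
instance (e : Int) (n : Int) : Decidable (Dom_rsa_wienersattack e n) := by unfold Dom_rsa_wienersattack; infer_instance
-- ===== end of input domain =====

-- B replaces A's four-function pipeline (recursive Euclid list, quotients, index-built
-- convergents table, then a scan) by ONE loop producing each quotient and running
-- convergent pair on the fly and testing it immediately (objective: simpler).

-- termination measure for the Euclidean recursions (cited by both ports)
theorem pvModAbsLt (x y : Int) (hy : y ≠ 0) : (PySem.Int.mod x y).natAbs < y.natAbs := by
  rcases lt_or_gt_of_ne hy with h | h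
  · have := PySem.Int.mod_neg_bounds x h; omega
  · have h1 := PySem.Int.mod_nonneg x h; have h2 := PySem.Int.mod_lt x h; omega

-- ===== PORT A =====
-- Python raises ZeroDivisionError when y = 0 (excluded by Pre_); the port returns [] there.
def extendedeuclidalgo (x y : Int) : List (Int × Int) :=
  if hy : y = 0 then []
  else
    let r := PySem.Int.mod x y
    if r = 0 then [(PySem.Int.floordiv x y, r)]
    else (PySem.Int.floordiv x y, r) :: extendedeuclidalgo y r
termination_by y.natAbs
decreasing_by exact pvModAbsLt x y hy

def continuedfracttions (x y : Int) : List Int :=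
  (extendedeuclidalgo x y).map Prod.fst

-- Python raises IndexError when fractions has fewer than 2 entries (excluded by Pre_).
def convergents (fractions : List Int) : List (Int × Int) :=
  match fractions with
  | f0 :: f1 :: _ =>
    (PySem.List.pyRange 2 (fractions.length : Int) 1).foldl
      (fun cs i =>
        let fi := PySem.List.pyGetD fractions i 0
        let c1 := PySem.List.pyGetD cs (i - 1) (0, 0)
        let c2 := PySem.List.pyGetD cs (i - 2) (0, 0)
        cs ++ [(fi * c1.1 + c2.1, fi * c1.2 + c2.2)])
      [(f0, 1), (f1 * f0 + 1, f1)]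
  | _ => []

-- A's for-loop over the convergents, with its early return
def wienerloop (e n : Int) : List (Int × Int) → Option (Int × Int)
  | [] => none
  | (k, d) :: rest =>
    if k = 0 then wienerloop e n rest
    else
      let phi := PySem.Int.floordiv (e * d - 1) k
      let x := n - phi + 1
      let x2 := PySem.Int.floordiv (x * x) 4
      if n > x2 then wienerloop e n rest
      else
        let squareroot : Int := ((x2 - n).toNat.sqrt : Int)  -- math.isqrt, argument ≥ 0 here
        let p := PySem.Int.floordiv x 2 + squareroot
        let q := PySem.Int.floordiv x 2 - squareroot
        if p * q = n then some (p, q) else wienerloop e n rest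

def rsa_wienersattack (e : Int) (n : Int) : Option (Int × Int) :=
  wienerloop e n ((convergents (continuedfracttions e n)).drop 1)

-- ===== PORT B =====
-- the while-loop of Source B: state (a, b, num_prev, num, den_prev, den)
def altLoop (e n a b np nu dp de : Int) : Option (Int × Int) :=
  if hb : b = 0 then none
  else
    let q := PySem.Int.floordiv a b
    let r := PySem.Int.mod a b
    let nu' := q * nu + np
    let de' := q * de + dp
    if nu' = 0 then altLoop e n b r nu nu' de de'
    else
      let phi := PySem.Int.floordiv (e * de' - 1) nu'
      let x := n - phi + 1
      let x2 := PySem.Int.floordiv (x * x) 4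
      if n > x2 then altLoop e n b r nu nu' de de'
      else
        let squareroot : Int := ((x2 - n).toNat.sqrt : Int)  -- math.isqrt, argument ≥ 0 here
        let p := PySem.Int.floordiv x 2 + squareroot
        let q2 := PySem.Int.floordiv x 2 - squareroot
        if p * q2 = n then some (p, q2) else altLoop e n b r nu nu' de de'
termination_by b.natAbs
decreasing_by all_goals exact pvModAbsLt a b hb

def rsa_wienersattack_alt (e : Int) (n : Int) : Option (Int × Int) :=
  altLoop e n n (PySem.Int.mod e n) 1 (PySem.Int.floordiv e n) 0 1

-- ===== PRECONDITION & SPEC =====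
-- Pre_ excludes exactly the inputs where A raises: n = 0 (ZeroDivisionError) and
-- n ∣ e with n ≠ 0 (one-quotient continued fraction, IndexError in convergents).
def Pre_rsa_wienersattack (e : Int) (n : Int) : Prop :=
  n ≠ 0 ∧ PySem.Int.mod e n ≠ 0
instance (e : Int) (n : Int) : Decidable (Pre_rsa_wienersattack e n) := by
  unfold Pre_rsa_wienersattack; infer_instance

def pvWitness_rsa_wienersattack : Int × Int := (17993, 90581)

def Spec_rsa_wienersattack (e : Int) (n : Int) (out : Option (Int × Int)) : Prop :=
  out = rsa_wienersattack_alt e n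
instance (e : Int) (n : Int) (out : Option (Int × Int)) : Decidable (Spec_rsa_wienersattack e n out) := by
  unfold Spec_rsa_wienersattack; infer_instance

-- ===== CLAIM (what is proved, stated in full; the proofs are below) =====
def Claim_equal_rsa_wienersattack : Prop := ∀ (e : Int) (n : Int), Dom_rsa_wienersattack e n → Pre_rsa_wienersattack e n → Spec_rsa_wienersattack e n (rsa_wienersattack e n)

-- ===== LEMMAS AND PROOFS =====

-- the per-convergent check shared by both loops (proof-side only)
def pvCheck (e n k d : Int) : Option (Int × Int) :=
  if k = 0 then none
  else
    let phi := PySem.Int.floordiv (e * d - 1) k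
    let x := n - phi + 1
    let x2 := PySem.Int.floordiv (x * x) 4
    if n > x2 then none
    else
      let squareroot : Int := ((x2 - n).toNat.sqrt : Int)
      let p := PySem.Int.floordiv x 2 + squareroot
      let q := PySem.Int.floordiv x 2 - squareroot
      if p * q = n then some (p, q) else none

-- convergents from a running pair of previous convergents
def pvConvFrom (p c : Int × Int) : List Int → List (Int × Int)
  | [] => []
  | f :: fs =>
    let nx := (f * c.1 + p.1, f * c.2 + p.2)
    nx :: pvConvFrom c nx fs

theorem wienerloop_cons (e n k d : Int) (rest : List (Int × Int)) :
    wienerloop e n ((k, d) :: rest) =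
      match pvCheck e n k d with
      | some v => some v
      | none => wienerloop e n rest := by
  simp only [wienerloop, pvCheck]
  split_ifs <;> rfl

theorem altLoop_ne (e n a b np nu dp de : Int) (hb : b ≠ 0) :
    altLoop e n a b np nu dp de =
      match pvCheck e n (PySem.Int.floordiv a b * nu + np) (PySem.Int.floordiv a b * de + dp) with
      | some v => some v
      | none => altLoop e n b (PySem.Int.mod a b) nu (PySem.Int.floordiv a b * nu + np)
                  de (PySem.Int.floordiv a b * de + dp) := by
  rw [altLoop, dif_neg hb]
  simp only [pvCheck]
  split_ifs <;> rfl

theorem cf_zero (a : Int) : continuedfracttions a 0 = [] := by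
  simp [continuedfracttions, extendedeuclidalgo]

theorem cf_ne (a b : Int) (hb : b ≠ 0) :
    continuedfracttions a b =
      PySem.Int.floordiv a b ::
        (if PySem.Int.mod a b = 0 then [] else continuedfracttions b (PySem.Int.mod a b)) := by
  rw [continuedfracttions, extendedeuclidalgo, dif_neg hb]
  by_cases h : PySem.Int.mod a b = 0 <;> simp [h, continuedfracttions]

-- B's loop runs A's scan over the convergents generated from the remaining quotients
theorem altLoop_eq_wienerloop (e n : Int) :
    ∀ (m : Nat) (a b np nu dp de : Int), b.natAbs = m →
      altLoop e n a b np nu dp de =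
        wienerloop e n (pvConvFrom (np, dp) (nu, de) (continuedfracttions a b)) := by
  intro m
  induction m using Nat.strong_induction_on with
  | _ m ih =>
    intro a b np nu dp de hm
    by_cases hb : b = 0
    · subst hb
      rw [cf_zero, altLoop]
      simp [pvConvFrom, wienerloop]
    · rw [cf_ne a b hb, altLoop_ne e n a b np nu dp de hb]
      simp only [pvConvFrom]
      rw [wienerloop_cons]
      cases pvCheck e n (PySem.Int.floordiv a b * nu + np) (PySem.Int.floordiv a b * de + dp) with
      | some v => rfl
      | none =>
        rw [ih (PySem.Int.mod a b).natAbs (hm ▸ pvModAbsLt a b hb) b _ _ _ _ _ rfl]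
        by_cases hr : PySem.Int.mod a b = 0
        · rw [hr, cf_zero, if_pos rfl]
        · rw [if_neg hr]

-- A's index-based fold builds exactly the running-pair convergents
theorem conv_fold (fr : List Int) :
    ∀ (fs : List Int) (cs : List (Int × Int)) (p c : Int × Int),
      2 ≤ cs.length → cs.length + fs.length = fr.length →
      fr.drop cs.length = fs →
      PySem.List.pyGetD cs ((cs.length : Int) - 1) (0, 0) = c →
      PySem.List.pyGetD cs ((cs.length : Int) - 2) (0, 0) = p →
      (PySem.List.pyRange (cs.length : Int) (fr.length : Int) 1).foldl
        (fun cs i =>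
          let fi := PySem.List.pyGetD fr i 0
          let c1 := PySem.List.pyGetD cs (i - 1) (0, 0)
          let c2 := PySem.List.pyGetD cs (i - 2) (0, 0)
          cs ++ [(fi * c1.1 + c2.1, fi * c1.2 + c2.2)]) cs
        = cs ++ pvConvFrom p c fs := by
  intro fs
  induction fs with
  | nil =>
    intro cs p c _ h2 _ _ _
    simp at h2
    have : (cs.length : Int) = (fr.length : Int) := by omega
    rw [this]
    simp [pysem, pvConvFrom]
  | cons f fs' ih =>
    intro cs p c h1 h2 h3 h4 h5
    have hlt : (cs.length : Int) < (fr.length : Int) := by simp at h2 ⊢; omega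
    have hfi : PySem.List.pyGetD fr (cs.length : Int) 0 = f := by
      rw [PySem.List.pyGetD_natCast]
      have hq : fr[cs.length]? = some f := by
        have := List.getElem?_drop (xs := fr) (i := cs.length) (j := 0)
        rw [h3] at this; simpa using this.symm
      simp [List.getD_eq_getElem?_getD, hq]
    have e1 : ((cs.length : Int) - 1) = ((cs.length - 1 : Nat) : Int) := by omega
    rw [PySem.List.pyRange_one_cons hlt, List.foldl_cons]
    simp only [hfi, h4, h5]
    have hstart : ((cs.length : Int) + 1) = (((cs ++ [(f * c.1 + p.1, f * c.2 + p.2)]).length : Nat) : Int) := by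
      simp
    rw [hstart,
        ih (cs ++ [(f * c.1 + p.1, f * c.2 + p.2)]) c (f * c.1 + p.1, f * c.2 + p.2)
          (by simp; omega) (by simp at h2 ⊢; omega)
          (by have := List.drop_drop (l := fr) (i := 1) (j := cs.length)
              rw [h3] at this
              simpa [Nat.add_comm] using this.symm)
          (by have e : (((cs ++ [(f * c.1 + p.1, f * c.2 + p.2)]).length : Nat) : Int) - 1
                  = ((cs.length : Nat) : Int) := by simp
              rw [e, PySem.List.pyGetD_natCast]
              simp [List.getD_eq_getElem?_getD])
          (by have e : (((cs ++ [(f * c.1 + p.1, f * c.2 + p.2)]).length : Nat) : Int) - 2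
                  = ((cs.length - 1 : Nat) : Int) := by simp; omega
              rw [e, PySem.List.pyGetD_natCast]
              have hj : cs.length - 1 < cs.length := by omega
              rw [List.getD_eq_getElem?_getD, List.getElem?_append_left hj,
                  ← List.getD_eq_getElem?_getD]
              rw [e1, PySem.List.pyGetD_natCast] at h4
              exact h4)]
    simp [pvConvFrom]

theorem convergents_eq (f0 f1 : Int) (rest : List Int) :
    convergents (f0 :: f1 :: rest) =
      (f0, 1) :: (f1 * f0 + 1, f1) :: pvConvFrom (f0, 1) (f1 * f0 + 1, f1) rest := by
  have h := conv_fold (f0 :: f1 :: rest) rest [(f0, 1), (f1 * f0 + 1, f1)]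
      (f0, 1) (f1 * f0 + 1, f1)
      (by simp) (by simp; omega) rfl rfl rfl
  rw [convergents]
  have h2 : (([(f0, 1), (f1 * f0 + 1, f1)].length : Nat) : Int) = (2 : Int) := by simp
  rw [h2] at h
  rw [h]
  simp

-- ===== VERDICT (by name: the statement is the Claim_ definition above) =====
theorem rsa_wienersattack_spec : Claim_equal_rsa_wienersattack := by
  intro e n _ hpre
  obtain ⟨hn, hr⟩ := hpre
  unfold Spec_rsa_wienersattack rsa_wienersattack rsa_wienersattack_alt
  rw [cf_ne e n hn, if_neg hr]
  -- the remaining continued fraction is nonempty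
  have hcf := cf_ne n (PySem.Int.mod e n) hr
  set q0 := PySem.Int.floordiv e n with hq0
  obtain ⟨f1, rest, hfr⟩ : ∃ f1 rest, continuedfracttions n (PySem.Int.mod e n) = f1 :: rest :=
    ⟨_, _, hcf⟩
  rw [hfr, convergents_eq, altLoop_eq_wienerloop e n _ n (PySem.Int.mod e n) 1 q0 0 1 rfl, hfr]
  simp [pvConvFrom]
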